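-- pv_equiv track=rewrite | github.com/somabencsik/AoC2025 | Day2/task1.py | get_wrong_ids
-- ===== SOURCE A (Python) =====
-- def get_wrong_ids(ids: list[list[int]]) -> list[int]:
--     """
--     Returns the wrong ids in a list.
--
--     Arguments
--     ---------
--     ids : list[list[int]]
--         List of list of numbers to check for wrong ID
--
--     Returns
--     -------
--     list[int]
--         List of wrong ids
--     """
--     wrong_ids = []
--     for id_list in ids:
--         for number in id_list:
--             number = str(number)
--             number_length = len(number)
--             if number_length % 2 != 0:
--                 continue
--             if number[: number_length // 2] == number[number_length // 2 :]:
--                 wrong_ids.append(int(number))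
--     return wrong_ids
-- ===== SOURCE B (Python) =====
-- def get_wrong_ids(ids: list[list[int]]) -> list[int]:
--     """Arithmetic re-implementation: a number is 'wrong' iff it is non-negative,
--     has an even number of decimal digits 2k, and its low k digits (as a value)
--     equal its high k digits; no string slicing."""
--     wrong_ids = []
--     for id_list in ids:
--         for number in id_list:
--             if number < 0:
--                 continue
--             d, t = 1, number
--             while t >= 10:
--                 t //= 10
--                 d += 1
--             if d % 2 != 0:
--                 continue
--             p = 10 ** (d // 2)
--             if number % p == number // p:
--                 wrong_ids.append(number)
--     return wrong_ids
-- ===== Notes on version B (the rewrite author's own statement) =====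
-- stated objective: alternative
-- what changed: Replaces the string conversion, slicing and half-comparison by pure integer arithmetic: skip negatives, count decimal digits with a division loop, and for an even digit count 2k compare number % 10**k with number // 10**k.
import Mathlib
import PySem

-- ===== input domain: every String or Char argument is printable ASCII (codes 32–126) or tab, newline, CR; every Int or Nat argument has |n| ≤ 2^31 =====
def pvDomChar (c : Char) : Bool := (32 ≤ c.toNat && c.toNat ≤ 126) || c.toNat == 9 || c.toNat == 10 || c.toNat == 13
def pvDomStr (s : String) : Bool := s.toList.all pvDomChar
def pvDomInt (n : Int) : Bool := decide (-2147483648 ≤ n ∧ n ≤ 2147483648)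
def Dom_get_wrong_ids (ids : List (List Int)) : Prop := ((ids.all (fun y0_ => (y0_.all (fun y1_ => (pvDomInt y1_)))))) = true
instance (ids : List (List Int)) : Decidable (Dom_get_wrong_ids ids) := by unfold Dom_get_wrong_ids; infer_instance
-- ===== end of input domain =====

-- B replaces A's string conversion / slicing / half-comparison by pure integer
-- arithmetic (skip negatives, count digits by division, compare n % 10^k with
-- n // 10^k); objective: alternative (same cost, no strings).


-- ===== PORT A =====
-- Python strings are modelled on List Char (PySem convention); `number = str(number)`
-- rebinds to the char list, slices are PySem.List.slice, and `int(number)` re-parses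
-- str(number), which is exactly the original integer, so the original integer is appended.
def get_wrong_ids (ids : List (List Int)) : List Int :=
  ids.foldl (fun wrong_ids id_list =>
    id_list.foldl (fun wrong_ids number =>
      let s : List Char := PySem.Int.toChars number          -- number = str(number)
      let number_length : Int := PySem.Chars.len s           -- len(number)
      if PySem.Int.mod number_length 2 ≠ 0 then wrong_ids    -- continue
      else if PySem.List.slice s none (some (PySem.Int.floordiv number_length 2))
              = PySem.List.slice s (some (PySem.Int.floordiv number_length 2)) none
        then wrong_ids ++ [number]                           -- append(int(number))
        else wrong_ids) wrong_ids) []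

-- ===== PORT B =====
-- `while t >= 10: t //= 10; d += 1` — the digit-counting loop of Source B
-- (structural recursion on a fuel bound t ≤ fuel, a totality device only)
def pvCountDigitsAux : Nat → Nat → Nat
  | 0, _ => 1
  | fuel + 1, t => if t < 10 then 1 else pvCountDigitsAux fuel (t / 10) + 1

def pvCountDigits (t : Nat) : Nat := pvCountDigitsAux t t

def get_wrong_ids_alt (ids : List (List Int)) : List Int :=
  ids.foldl (fun wrong_ids id_list =>
    id_list.foldl (fun wrong_ids number =>
      if number < 0 then wrong_ids
      else
        let d : Nat := pvCountDigits number.toNat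
        if d % 2 ≠ 0 then wrong_ids
        else
          let p : Int := (10 : Int) ^ (d / 2)
          if PySem.Int.mod number p = PySem.Int.floordiv number p
            then wrong_ids ++ [number]
            else wrong_ids) wrong_ids) []

-- ===== PRECONDITION & SPEC =====
def Spec_get_wrong_ids (ids : List (List Int)) (out : List Int) : Prop := out = get_wrong_ids_alt ids
instance (ids : List (List Int)) (out : List Int) : Decidable (Spec_get_wrong_ids ids out) := by unfold Spec_get_wrong_ids; infer_instance

-- ===== CLAIM (what is proved, stated in full; the proofs are below) =====
def Claim_equal_get_wrong_ids : Prop := ∀ (ids : List (List Int)), Dom_get_wrong_ids ids → Spec_get_wrong_ids ids (get_wrong_ids ids)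


-- ===== LEMMAS AND PROOFS =====

-- Nat.toDigits 10 is the reversed, digit-char-mapped Nat.digits 10 list.
theorem pv_toDigitsCore_eq (f : Nat) : ∀ (n : Nat) (l : List Char), n ≠ 0 → n < f →
    Nat.toDigitsCore 10 f n l = ((Nat.digits 10 n).map Nat.digitChar).reverse ++ l := by
  induction f with
  | zero => intro n l h hf; omega
  | succ f ih =>
    intro n l h hf
    rw [Nat.toDigitsCore]
    rw [Nat.digits_def' (by norm_num : 1 < 10) (by omega)]
    by_cases h10 : n / 10 = 0
    · simp [h10, Nat.digits_zero]
    · rw [if_neg h10, ih (n / 10) _ h10 (by omega)]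
      simp

theorem pv_toDigits10_eq (m : Nat) :
    Nat.toDigits 10 m = if m = 0 then ['0'] else ((Nat.digits 10 m).map Nat.digitChar).reverse := by
  by_cases h : m = 0
  · subst h; rfl
  · rw [if_neg h, Nat.toDigits, pv_toDigitsCore_eq (m+1) m [] h (by omega), List.append_nil]

theorem pv_digitChar_ne_dash (x : Nat) : Nat.digitChar x ≠ '-' := by
  by_cases h : x < 16
  · interval_cases x <;> decide
  · simp only [Nat.digitChar]
    repeat rw [if_neg (by omega)]
    decide

theorem pv_digitChar_inj {a b : Nat} (ha : a < 10) (hb : b < 10)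
    (h : Nat.digitChar a = Nat.digitChar b) : a = b := by
  interval_cases a <;> interval_cases b <;> first | rfl | (exfalso; revert h; decide)

theorem pv_map_digitChar_inj {xs ys : List Nat} (hx : ∀ x ∈ xs, x < 10) (hy : ∀ y ∈ ys, y < 10) :
    xs.map Nat.digitChar = ys.map Nat.digitChar ↔ xs = ys := by
  constructor
  · intro h
    induction xs generalizing ys with
    | nil => cases ys <;> simp_all
    | cons a t iht =>
      cases ys with
      | nil => simp_all
      | cons b u =>
        simp only [List.map_cons, List.cons.injEq] at h
        have hab : a = b := pv_digitChar_inj (hx a (by simp)) (hy b (by simp)) h.1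
        subst hab
        simp only [List.cons.injEq, true_and]
        exact iht (fun x hx' => hx x (by simp [hx'])) (fun y hy' => hy y (by simp [hy'])) h.2
  · intro h; rw [h]

theorem pv_countDigitsAux_eq (fuel : Nat) : ∀ t : Nat, 0 < t → t ≤ fuel →
    pvCountDigitsAux fuel t = (Nat.digits 10 t).length := by
  induction fuel with
  | zero => intro t ht hf; omega
  | succ fuel ih =>
    intro t ht hf
    rw [pvCountDigitsAux, Nat.digits_def' (by norm_num : 1 < 10) ht]
    by_cases h : t < 10
    · rw [if_pos h, List.length_cons, Nat.div_eq_of_lt h, Nat.digits_zero]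
      rfl
    · have h1 : t / 10 < t := Nat.div_lt_self ht (by omega)
      rw [if_neg h, List.length_cons, ih (t / 10) (by omega) (by omega)]

theorem pv_countDigits_eq (m : Nat) (hm : 0 < m) : pvCountDigits m = (Nat.digits 10 m).length :=
  pv_countDigitsAux_eq m m hm le_rfl

-- core arithmetic fact: the two halves of the digit list agree iff low = high numerically
theorem pv_take_drop_iff (m k : Nat) (hm : 0 < m) (hL : (Nat.digits 10 m).length = 2 * k) :
    (Nat.digits 10 m).take k = (Nat.digits 10 m).drop k ↔ m % 10 ^ k = m / 10 ^ k := by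
  constructor
  · intro h
    rw [Nat.self_mod_pow_eq_ofDigits_take k m (by norm_num),
        Nat.self_div_pow_eq_ofDigits_drop k m (by norm_num), h]
  · intro h
    have hk : 0 < k := by
      rcases Nat.eq_zero_or_pos k with h0 | h0
      · exfalso
        rw [h0, Nat.mul_zero, List.length_eq_zero_iff, Nat.digits_eq_nil_iff_eq_zero] at hL
        omega
      · exact h0
    set v := m / 10 ^ k with hv
    have hub : m < 10 ^ (2 * k) :=
      (Nat.digits_length_le_iff (by norm_num : 1 < 10) m).mp (le_of_eq hL)
    have hlb : 10 ^ (2 * k - 1) ≤ m :=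
      (Nat.lt_digits_length_iff (by norm_num : 1 < 10) m).mp (by omega)
    have hvub : v < 10 ^ k := by
      rw [hv]
      apply Nat.div_lt_of_lt_mul
      calc m < 10 ^ (2 * k) := hub
        _ = 10 ^ k * 10 ^ k := by rw [← pow_add]; ring_nf
    have hvlb : 10 ^ (k - 1) ≤ v := by
      rw [hv]
      apply (Nat.le_div_iff_mul_le (pow_pos (by norm_num : (0:Nat) < 10) k)).mpr
      calc 10 ^ (k - 1) * 10 ^ k = 10 ^ (2 * k - 1) := by rw [← pow_add]; congr 1; omega
        _ ≤ m := hlb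
    have hlenv : (Nat.digits 10 v).length = k := by
      have h1 : (Nat.digits 10 v).length ≤ k := (Nat.digits_length_le_iff (by norm_num) v).mpr hvub
      have h2 : k - 1 < (Nat.digits 10 v).length := (Nat.lt_digits_length_iff (by norm_num) v).mpr hvlb
      omega
    have hm_eq : m = v + 10 ^ k * v := by
      have h2 := Nat.div_add_mod m (10 ^ k)
      rw [← hv] at h2
      omega
    have hd : Nat.digits 10 m = Nat.digits 10 v ++ Nat.digits 10 v := by
      conv_lhs => rw [hm_eq, ← hlenv]
      exact (Nat.digits_append_digits (by norm_num)).symm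
    rw [hd, ← hlenv]
    simp

-- the half-string comparison in A, for a positive number, is B's arithmetic test
theorem pv_cond_iff (m k : Nat) (hm : 0 < m) (hL : (Nat.digits 10 m).length = 2 * k) :
    (((Nat.digits 10 m).map Nat.digitChar).reverse.take k =
     ((Nat.digits 10 m).map Nat.digitChar).reverse.drop k) ↔ m % 10 ^ k = m / 10 ^ k := by
  rw [List.take_reverse, List.drop_reverse, List.reverse_inj]
  have hlen : ((Nat.digits 10 m).map Nat.digitChar).length = 2 * k := by simpa using hL
  rw [hlen, (by omega : 2 * k - k = k), ← List.map_take, ← List.map_drop,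
      pv_map_digitChar_inj
        (fun x hx => Nat.digits_lt_base (by norm_num) (List.mem_of_mem_drop hx))
        (fun y hy => Nat.digits_lt_base (by norm_num) (List.mem_of_mem_take hy))]
  constructor
  · intro h; exact (pv_take_drop_iff m k hm hL).mp h.symm
  · intro h; exact ((pv_take_drop_iff m k hm hL).mpr h).symm

theorem pv_mod_natCast_two (L : Nat) : PySem.Int.mod (L : Int) 2 = ((L % 2 : Nat) : Int) := by
  rw [PySem.Int.mod_eq_emod_of_pos (by norm_num)]
  omega

theorem pv_floordiv_natCast_two (L : Nat) : PySem.Int.floordiv (L : Int) 2 = ((L / 2 : Nat) : Int) := by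
  rw [PySem.Int.floordiv_eq_ediv_of_pos (by norm_num)]
  omega

-- the two per-number loop bodies agree
theorem pv_body_eq (acc : List Int) (number : Int) :
    (let s : List Char := PySem.Int.toChars number
     let number_length : Int := PySem.Chars.len s
     if PySem.Int.mod number_length 2 ≠ 0 then acc
     else if PySem.List.slice s none (some (PySem.Int.floordiv number_length 2))
             = PySem.List.slice s (some (PySem.Int.floordiv number_length 2)) none
       then acc ++ [number] else acc) =
    (if number < 0 then acc
     else
       let d : Nat := pvCountDigits number.toNat
       if d % 2 ≠ 0 then acc
       else
         let p : Int := (10 : Int) ^ (d / 2)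
         if PySem.Int.mod number p = PySem.Int.floordiv number p
           then acc ++ [number] else acc) := by
  simp only [PySem.Chars.len]
  by_cases hneg : number < 0
  · -- A: the string starts with '-', so the halves can never match; B: skipped at once
    rw [if_pos hneg]
    have hm : number.natAbs ≠ 0 := by omega
    set td : List Char := ((Nat.digits 10 number.natAbs).map Nat.digitChar).reverse with htd
    have hchars : PySem.Int.toChars number = '-' :: td := by
      rw [PySem.Int.toChars, if_pos hneg, pv_toDigits10_eq, if_neg hm]
    simp only [hchars, pv_mod_natCast_two, pv_floordiv_natCast_two,
      PySem.List.slice_to_natCast, PySem.List.slice_from_natCast]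
    have hlen : ('-' :: td).length = td.length + 1 := by simp
    by_cases hpar : ('-' :: td).length % 2 = 0
    · have hA0 : (((('-' :: td).length % 2 : Nat)) : Int) = 0 := by rw [hpar]; rfl
      rw [if_neg (not_ne_iff.mpr hA0), if_neg]
      intro heq
      have hk : 1 ≤ ('-' :: td).length / 2 := by omega
      obtain ⟨k', hk'⟩ : ∃ k', ('-' :: td).length / 2 = k' + 1 :=
        ⟨('-' :: td).length / 2 - 1, by omega⟩
      have hmem : '-' ∈ ('-' :: td).take (('-' :: td).length / 2) := by
        rw [hk']
        simp
      rw [heq, hk'] at hmem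
      simp only [List.drop_succ_cons] at hmem
      have hmem2 : '-' ∈ td := List.mem_of_mem_drop hmem
      rw [htd] at hmem2
      simp only [List.mem_reverse, List.mem_map] at hmem2
      obtain ⟨x, _, hx⟩ := hmem2
      exact pv_digitChar_ne_dash x hx
    · rw [if_pos (Int.natCast_ne_zero.mpr hpar)]
  · -- number ≥ 0
    rw [if_neg hneg]
    obtain ⟨m, rfl⟩ : ∃ m : Nat, number = (m : Int) :=
      ⟨number.toNat, (Int.toNat_of_nonneg (by omega)).symm⟩
    simp only [Int.toNat_natCast]
    by_cases hm0 : m = 0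
    · subst hm0
      rw [if_pos (by decide), if_pos (by decide)]
    · have hmpos : 0 < m := by omega
      have hchars : PySem.Int.toChars (m : Int) = ((Nat.digits 10 m).map Nat.digitChar).reverse := by
        rw [PySem.Int.toChars, if_neg (by omega), Int.toNat_natCast, pv_toDigits10_eq, if_neg hm0]
      have hd : pvCountDigits m = (Nat.digits 10 m).length := pv_countDigits_eq m hmpos
      simp only [hchars, hd, List.length_reverse, List.length_map,
        pv_mod_natCast_two, pv_floordiv_natCast_two,
        PySem.List.slice_to_natCast, PySem.List.slice_from_natCast]
      by_cases hpar : (Nat.digits 10 m).length % 2 = 0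
      · have hA0 : ((((Nat.digits 10 m).length % 2 : Nat)) : Int) = 0 := by rw [hpar]; rfl
        rw [if_neg (not_ne_iff.mpr hA0)]
        conv_rhs => rw [if_neg (not_ne_iff.mpr hpar)]
        have hmod : PySem.Int.mod ((m : Int)) ((10 : Int) ^ ((Nat.digits 10 m).length / 2)) =
            ((m % 10 ^ ((Nat.digits 10 m).length / 2) : Nat) : Int) := by
          rw [show ((10 : Int) ^ ((Nat.digits 10 m).length / 2)) =
              (((10 ^ ((Nat.digits 10 m).length / 2) : Nat)) : Int) by push_cast; ring]
          exact PySem.Int.mod_natCast m _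
        have hdiv : PySem.Int.floordiv ((m : Int)) ((10 : Int) ^ ((Nat.digits 10 m).length / 2)) =
            ((m / 10 ^ ((Nat.digits 10 m).length / 2) : Nat) : Int) := by
          rw [show ((10 : Int) ^ ((Nat.digits 10 m).length / 2)) =
              (((10 ^ ((Nat.digits 10 m).length / 2) : Nat)) : Int) by push_cast; ring]
          exact PySem.Int.floordiv_natCast m _
        refine if_congr ?_ rfl rfl
        rw [hmod, hdiv, Int.natCast_inj]
        exact pv_cond_iff m ((Nat.digits 10 m).length / 2) hmpos (by omega)
      · rw [if_pos (Int.natCast_ne_zero.mpr hpar), if_pos hpar]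

-- ===== VERDICT (by name: the statement is the Claim_ definition above) =====
theorem get_wrong_ids_spec : Claim_equal_get_wrong_ids := by
  intro ids _
  unfold Spec_get_wrong_ids get_wrong_ids get_wrong_ids_alt
  congr 1
  funext acc l
  congr 1
  funext a n
  exact pv_body_eq a n
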